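-- pv_equiv track=rewrite | github.com/TakYusaku/jintoriGameWebApp | jinGame/jinGame.py | get_around_point
-- ===== SOURCE A (Python) =====
-- def get_dim_list(li): # 2次元配列(list)のshapeを取得
--     return [len(li),len([len(v) for v in li])]
--
-- def get_around_point(pf,x,y): # 特徴量(自分周辺のポイント)
--     # x,y は座標
--     dim = get_dim_list(pf)
--     if x==0 or x == dim[0]-1 or y==0 or y == dim[1]-1:
--         p_list = [[-10] * 3 for i in [1] * 3]
--         for i in range(1,4):
--             if i==1 and y-i < 0:
--                 pass
--             elif i==3 and y+1 == dim[1]: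
--                 pass
--             else:
--                 yi = 2-i
--                 for j in range(1,4):
--                     if j==1 and x-j < 0:
--                         pass
--                     elif j==3 and x+1 == dim[0]:
--                         pass
--                     else:
--                         xj = 2-j
--                         p_list[i-1][j-1] = int(pf[y-yi][x-xj])
--         p_list = sum(p_list, [])
--     else:
--         p_list = []
--         for i in range(1,4):
--             yi = 2-i
--             for j in range(1,4):
--                 xj = 2-j
--                 p_list.append(int(pf[y-yi][x-xj]))
--
--     return p_list
-- ===== SOURCE B (Python) =====
-- def get_around_point(pf, x, y):
--     n = len(pf)
--     out = []
--     for dy in (-1, 0, 1):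
--         for dx in (-1, 0, 1):
--             if (dy == -1 and y == 0) or (dy == 1 and y + 1 == n) or \
--                (dx == -1 and x == 0) or (dx == 1 and x + 1 == n):
--                 out.append(-10)
--             else:
--                 out.append(int(pf[y + dy][x + dx]))
--     return out
-- ===== Notes on version B (the rewrite author's own statement) =====
-- stated objective: simpler
-- what changed: Replaced A's interior/boundary split with its pre-initialized 3x3 sentinel grid, in-place index assignments and sum(...,[]) flatten by one flat double loop over offsets dy,dx in (-1,0,1) that appends per cell either -10 (when the offset crosses the grid edge) or pf[y+dy][x+dx].
-- outside the precondition, e.g. on get_around_point([[5]], 0, -1): A returns [-10, -10, -10, -10, 5, -10, -10, 5, -10], B raises IndexError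
import Mathlib
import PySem

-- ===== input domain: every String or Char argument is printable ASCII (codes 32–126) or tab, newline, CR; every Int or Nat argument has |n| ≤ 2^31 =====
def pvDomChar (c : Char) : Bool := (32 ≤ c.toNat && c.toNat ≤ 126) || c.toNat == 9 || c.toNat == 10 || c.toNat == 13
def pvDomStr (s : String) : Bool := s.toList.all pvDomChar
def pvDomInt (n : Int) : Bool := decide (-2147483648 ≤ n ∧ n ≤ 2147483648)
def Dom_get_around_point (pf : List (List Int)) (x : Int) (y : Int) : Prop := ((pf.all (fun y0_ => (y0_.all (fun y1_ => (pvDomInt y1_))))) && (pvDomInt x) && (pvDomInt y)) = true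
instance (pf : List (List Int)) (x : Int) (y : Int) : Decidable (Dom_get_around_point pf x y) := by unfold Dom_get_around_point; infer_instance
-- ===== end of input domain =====

-- B replaces A's interior/boundary split + pre-initialized 3x3 sentinel grid + flatten by one
-- flat double loop over offsets, appending per cell either -10 or the neighbour value (simpler).

-- pf[r][c] with Python index semantics; both Pythons read cells this way.
-- The .getD defaults are only reached where Python raises IndexError, which Pre_ excludes.
def pvCell (pf : List (List Int)) (r c : Int) : Int :=
  (PySem.List.pyGet? ((PySem.List.pyGet? pf r).getD []) c).getD 0

-- ===== PORT A =====
def get_dim_list (li : List (List Int)) : List Int :=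
  [Int.ofNat li.length, Int.ofNat (li.map (fun v => Int.ofNat v.length)).length]

def get_around_point (pf : List (List Int)) (x : Int) (y : Int) : List Int :=
  let dim := get_dim_list pf
  let d0 := (PySem.List.pyGet? dim 0).getD 0
  let d1 := (PySem.List.pyGet? dim 1).getD 0
  if x = 0 ∨ x = d0 - 1 ∨ y = 0 ∨ y = d1 - 1 then
    let init : List (List Int) := [[-10,-10,-10],[-10,-10,-10],[-10,-10,-10]]
    let p := (PySem.List.pyRange 1 4 1).foldl (fun p i =>
      if i = 1 ∧ y - i < 0 then p
      else if i = 3 ∧ y + 1 = d1 then p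
      else
        let yi := 2 - i
        (PySem.List.pyRange 1 4 1).foldl (fun p j =>
          if j = 1 ∧ x - j < 0 then p
          else if j = 3 ∧ x + 1 = d0 then p
          else
            let xj := 2 - j
            -- p_list[i-1][j-1] = ...: i,j ∈ {1,2,3} here, so i-1,j-1 are nonnegative and toNat is exact
            p.modify (i-1).toNat (fun row => row.set (j-1).toNat (pvCell pf (y - yi) (x - xj)))) p) init
    p.flatten
  else
    (PySem.List.pyRange 1 4 1).foldl (fun acc i =>
      let yi := 2 - i
      (PySem.List.pyRange 1 4 1).foldl (fun acc j =>
        let xj := 2 - j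
        acc ++ [pvCell pf (y - yi) (x - xj)]) acc) []

-- ===== PORT B =====
def get_around_point_alt (pf : List (List Int)) (x : Int) (y : Int) : List Int :=
  let n : Int := ((pf.length : Int))
  [(-1 : Int), 0, 1].foldl (fun out dy =>
    [(-1 : Int), 0, 1].foldl (fun out dx =>
      if (dy = -1 ∧ y = 0) ∨ (dy = 1 ∧ y + 1 = n) ∨ (dx = -1 ∧ x = 0) ∨ (dx = 1 ∧ x + 1 = n)
      then out ++ [-10]
      else out ++ [pvCell pf (y + dy) (x + dx)]) out) []

-- ===== PRECONDITION & SPEC =====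
-- Pre_ excludes inputs where A raises IndexError (a read neighbour cell missing from a short row),
-- and out-of-range or negative coordinates that hit A's boundary branch, where A's value is an
-- accident of Python negative-index wraparound; B's natural reading legitimately differs there.
-- (Out-of-range coordinates on which A takes its direct-read branch ARE admitted: both programs
-- then read the same nine wrapped cells.)
def Pre_get_around_point (pf : List (List Int)) (x : Int) (y : Int) : Prop :=
  (0 < pf.length ∧ 0 ≤ x ∧ x < (pf.length : Int) ∧ 0 ≤ y ∧ y < (pf.length : Int) ∧
   (∀ dy ∈ ([-1, 0, 1] : List Int), ∀ dx ∈ ([-1, 0, 1] : List Int),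
     ¬((dy = -1 ∧ y = 0) ∨ (dy = 1 ∧ y + 1 = (pf.length : Int)) ∨
       (dx = -1 ∧ x = 0) ∨ (dx = 1 ∧ x + 1 = (pf.length : Int))) →
     x + dx < ((pf.getD (y + dy).toNat []).length : Int)))
  ∨
  (x ≠ 0 ∧ x ≠ (pf.length : Int) - 1 ∧ y ≠ 0 ∧ y ≠ (pf.length : Int) - 1 ∧
   (∀ dy ∈ ([-1, 0, 1] : List Int), PySem.Raise.InRange pf.length (y + dy) ∧
     ∀ dx ∈ ([-1, 0, 1] : List Int),
       PySem.Raise.InRange ((PySem.List.pyGet? pf (y + dy)).getD []).length (x + dx)))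
instance (pf : List (List Int)) (x : Int) (y : Int) : Decidable (Pre_get_around_point pf x y) := by
  unfold Pre_get_around_point; infer_instance
def pvWitness_get_around_point : List (List Int) × Int × Int := ([[1,2,3],[4,5,6],[7,8,9]], 1, 2)
def Spec_get_around_point (pf : List (List Int)) (x : Int) (y : Int) (out : List Int) : Prop := out = get_around_point_alt pf x y
instance (pf : List (List Int)) (x : Int) (y : Int) (out : List Int) : Decidable (Spec_get_around_point pf x y out) := by unfold Spec_get_around_point; infer_instance

-- ===== CLAIM (what is proved, stated in full; the proofs are below) =====
def Claim_equal_get_around_point : Prop := ∀ (pf : List (List Int)) (x : Int) (y : Int), Dom_get_around_point pf x y → Pre_get_around_point pf x y → Spec_get_around_point pf x y (get_around_point pf x y)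

-- ===== LEMMAS AND PROOFS =====

-- ===== VERDICT (by name: the statement is the Claim_ definition above) =====
set_option maxHeartbeats 4000000 in
theorem get_around_point_spec : Claim_equal_get_around_point := by
  intro pf x y _ hpre
  have hr : PySem.List.pyRange 1 4 1 = [1,2,3] := by decide
  have e0 : (PySem.List.pyGet? (get_dim_list pf) 0).getD 0 = ((pf.length : Int)) := rfl
  have e1 : (PySem.List.pyGet? (get_dim_list pf) 1).getD 0 = ((pf.length : Int)) := by simp [get_dim_list, PySem.List.pyGet?, PySem.List.pyIdx?]
  have c1 : (x = ((pf.length : Int)) - 1) ↔ (x + 1 = ((pf.length : Int))) := by omega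
  have c2 : (y = ((pf.length : Int)) - 1) ↔ (y + 1 = ((pf.length : Int))) := by omega
  unfold Spec_get_around_point get_around_point get_around_point_alt
  rcases hpre with ⟨hn, hx0, hxn, hy0, hyn, -⟩ | ⟨hx, hX1, hy, hY1, -⟩
  · by_cases hx : x = 0 <;> by_cases hX : x + 1 = ((pf.length : Int)) <;>
      by_cases hy : y = 0 <;> by_cases hY : y + 1 = ((pf.length : Int)) <;>
        simp [hr, e0, e1, List.foldl, c1, c2, hx, hX, hy, hY]
    all_goals try split_ifs
    all_goals try (exfalso; omega)
    all_goals try simp [List.modify]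
    all_goals try ring_nf
    all_goals try simp
  · have hX : ¬ x + 1 = ((pf.length : Int)) := by omega
    have hY : ¬ y + 1 = ((pf.length : Int)) := by omega
    simp [hr, e0, e1, List.foldl, c1, c2, hx, hX, hy, hY]
    try ring_nf
    try simp
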